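-- pv_equiv track=rewrite | github.com/BrandonCarp/ddscatalog | LeetCode/plates.py | first_num
-- ===== SOURCE A (Python) =====
-- def first_num(s):
--     seen_num = False
--     for i, ch in enumerate(s):
--         if ch.isdigit():
--             if not seen_num:
--                 if ch == '0':
--                     return False
--                 seen_num = True
--         else:
--             if seen_num:
--                 if ch.isalpha():
--
--                     return False
--
--
--     return True
-- ===== SOURCE B (Python) =====
-- def first_num(s):
--     pivot = next(((i, c) for i, c in enumerate(s) if c.isdigit()), None)
--     if pivot is None:
--         return True
--     i, c = pivot
--     last_alpha = max((j for j, ch in enumerate(s) if ch.isalpha()), default=-1)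
--     return c != '0' and last_alpha < i
-- ===== Notes on version B (the rewrite author's own statement) =====
-- stated objective: alternative
-- what changed: Replaces A's flag-based single-pass state machine with two independent index computations (index/char of the first digit, largest index of any alphabetic char) combined by one arithmetic comparison last_alpha < first_digit.
import Mathlib
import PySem

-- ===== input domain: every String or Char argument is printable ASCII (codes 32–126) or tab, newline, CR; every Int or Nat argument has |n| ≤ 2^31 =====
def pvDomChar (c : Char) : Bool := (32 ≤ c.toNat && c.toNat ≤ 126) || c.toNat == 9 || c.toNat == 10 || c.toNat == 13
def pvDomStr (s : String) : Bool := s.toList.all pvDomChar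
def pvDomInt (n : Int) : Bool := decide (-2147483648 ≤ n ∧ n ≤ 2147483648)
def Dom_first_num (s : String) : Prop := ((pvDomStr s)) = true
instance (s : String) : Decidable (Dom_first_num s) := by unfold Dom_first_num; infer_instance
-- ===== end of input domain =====

-- B drops A's flag-based state machine for two independent index scans (first digit,
-- last alphabetic index) joined by one arithmetic comparison (objective: alternative).

-- ===== PORT A =====
-- A's loop with the seen_num flag and early returns, as structural recursion over the chars.
def firstNumLoopA : List Char → Bool → Bool
  | [], _ => true
  | ch :: rest, seen =>
    if PySem.Chars.isdigit ch then
      if !seen then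
        if ch = '0' then false
        else firstNumLoopA rest true
      else firstNumLoopA rest seen
    else
      if seen && PySem.Chars.isalpha ch then false
      else firstNumLoopA rest seen

def first_num (s : String) : Bool := firstNumLoopA s.toList false

-- ===== PORT B =====
-- B's pivot scan: next(((i, c) for i, c in enumerate(s) if c.isdigit()), None)
def findDigit : List Char → Nat → Option (Nat × Char)
  | [], _ => none
  | c :: cs, i => if PySem.Chars.isdigit c then some (i, c) else findDigit cs (i + 1)

-- B's max((j for j, ch in enumerate(s) if ch.isalpha()), default=-1)
def lastAlpha : List Char → Nat → Int → Int
  | [], _, acc => acc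
  | c :: cs, j, acc => lastAlpha cs (j + 1) (if PySem.Chars.isalpha c then (j : Int) else acc)

def first_num_alt (s : String) : Bool :=
  match findDigit s.toList 0 with
  | none => true
  | some (i, c) => (c ≠ '0') && (lastAlpha s.toList 0 (-1) < (i : Int))

-- ===== PRECONDITION & SPEC =====
def Spec_first_num (s : String) (out : Bool) : Prop := out = first_num_alt s
instance (s : String) (out : Bool) : Decidable (Spec_first_num s out) := by unfold Spec_first_num; infer_instance

-- ===== CLAIM (what is proved, stated in full; the proofs are below) =====
def Claim_equal_first_num : Prop := ∀ (s : String), Dom_first_num s → Spec_first_num s (first_num s)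

-- ===== LEMMAS AND PROOFS =====
theorem isalpha_of_isdigit {c : Char} (hd : PySem.Chars.isdigit c = true) :
    PySem.Chars.isalpha c = false := by
  simp only [PySem.Chars.isdigit, PySem.Chars.isalpha, PySem.Chars.isupper,
    PySem.Chars.islower, Bool.and_eq_true, decide_eq_true_eq, Char.le_def,
    UInt32.le_iff_toNat_le] at hd ⊢
  simp only [Bool.or_eq_false_iff, Bool.and_eq_false_iff, decide_eq_false_iff_not, not_le]
  have e0 : '0'.val.toNat = 48 := rfl
  have e9 : '9'.val.toNat = 57 := rfl
  have eA : 'A'.val.toNat = 65 := rfl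
  have eZ : 'Z'.val.toNat = 90 := rfl
  have ea : 'a'.val.toNat = 97 := rfl
  have ez : 'z'.val.toNat = 122 := rfl
  omega

-- With the flag set, A's remaining loop is exactly "no alphabetic char in the rest".
theorem firstNumLoopA_seen (l : List Char) : firstNumLoopA l true = !(l.any PySem.Chars.isalpha) := by
  induction l with
  | nil => rfl
  | cons c cs ih =>
    simp only [firstNumLoopA, List.any_cons, Bool.not_true, Bool.false_eq_true, if_false,
      Bool.true_and]
    by_cases hd : PySem.Chars.isdigit c = true
    · simp [hd, isalpha_of_isdigit hd, ih]
    · by_cases ha : PySem.Chars.isalpha c = true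
      · simp [hd, ha]
      · simp [hd, Bool.not_eq_true] at ha ⊢
        simp [ha, ih]

-- lastAlpha from an all-larger start index is below i iff the acc is and no alpha occurs.
theorem lastAlpha_lt (l : List Char) : ∀ (j : Nat) (a i : Int), i ≤ (j : Int) →
    ((lastAlpha l j a < i) ↔ (a < i ∧ l.any PySem.Chars.isalpha = false)) := by
  induction l with
  | nil => intro j a i _; simp [lastAlpha]
  | cons c cs ih =>
    intro j a i hij
    simp only [lastAlpha, List.any_cons, Bool.or_eq_false_iff]
    rw [ih (j + 1) _ i (by push_cast; omega)]
    cases ha : PySem.Chars.isalpha c with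
    | false => simp [ha]
    | true =>
      have hnj : ¬ ((j : Int) < i) := by omega
      simp [ha, hnj]

-- The main invariant: A's unseen-phase loop equals B's pivot/compare formula.
theorem loopA_eq_B (l : List Char) : ∀ (k : Nat) (acc : Int), acc < (k : Int) →
    firstNumLoopA l false =
      (match findDigit l k with
       | none => true
       | some (i, c) => (c ≠ '0') && (lastAlpha l k acc < (i : Int))) := by
  induction l with
  | nil => intro k acc _; rfl
  | cons c cs ih =>
    intro k acc hacc
    by_cases hd : PySem.Chars.isdigit c = true
    · simp only [firstNumLoopA, findDigit, lastAlpha, hd, if_true, Bool.not_false,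
        isalpha_of_isdigit hd, if_false]
      by_cases h0 : c = '0'
      · simp [h0]
      · have := lastAlpha_lt cs (k + 1) acc (k : Int) (by push_cast; omega)
        simp only [firstNumLoopA_seen, h0, this]
        cases h : cs.any PySem.Chars.isalpha with
        | false => simp [h, h0, this.mpr ⟨hacc, h⟩]
        | true => simp [h] at this; simp [h, h0, this]
    · have ha' : (if PySem.Chars.isalpha c then (k : Int) else acc) < ((k + 1 : Nat) : Int) := by
        split <;> push_cast <;> omega
      simp only [firstNumLoopA, findDigit, lastAlpha, hd, if_false, Bool.false_and,
        Bool.false_eq_true]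
      exact ih (k + 1) _ ha'

-- ===== VERDICT (by name: the statement is the Claim_ definition above) =====
theorem first_num_spec : Claim_equal_first_num := by
  intro s _
  show first_num s = first_num_alt s
  exact loopA_eq_B s.toList 0 (-1) (by norm_num)
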